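-- pv_equiv track=rewrite | github.com/DuskPastDawn/COMP475Projects | GracefulFunction.py | dif_unique
-- ===== SOURCE A (Python) =====
-- def dif_unique(arr):
--     seen = set() #Empty set variable
--     for i in range(len(arr)): #looping through the array
--         if i>0: #Skipping to the 2nd item because we are comparing with one item prior in array
--             diff = abs(arr[i] - arr[i-1]) #Find difference between current int and last int
--             if diff in seen: #If int is in set, return false
--                 return False;
--             seen.add(diff) #Otherwise, add the diff to set
--     return True #If all differences are unique, return true
-- ===== SOURCE B (Python) =====
-- def dif_unique(arr):
--     diffs = sorted(abs(x - y) for x, y in zip(arr[1:], arr))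
--     for x, y in zip(diffs, diffs[1:]):
--         if x == y:
--             return False
--     return True
-- ===== Notes on version B (the rewrite author's own statement) =====
-- stated objective: alternative
-- what changed: Replaces A's hash-set membership test inside the scan by a sort-then-adjacent-scan: build the consecutive-difference list, sort it, and report a duplicate iff two equal values end up adjacent.
import Mathlib
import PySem

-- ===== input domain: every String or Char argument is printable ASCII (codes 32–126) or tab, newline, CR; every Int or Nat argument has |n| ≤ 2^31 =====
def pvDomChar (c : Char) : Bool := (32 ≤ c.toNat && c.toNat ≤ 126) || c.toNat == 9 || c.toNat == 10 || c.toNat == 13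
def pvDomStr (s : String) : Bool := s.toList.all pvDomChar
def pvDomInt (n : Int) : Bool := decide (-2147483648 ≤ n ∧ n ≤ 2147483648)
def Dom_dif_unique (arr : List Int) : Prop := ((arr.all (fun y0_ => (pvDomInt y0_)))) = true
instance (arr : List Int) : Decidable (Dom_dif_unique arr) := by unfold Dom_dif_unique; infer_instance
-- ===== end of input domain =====

-- B replaces A's hash-set scan with a different algorithm: build the consecutive-difference
-- list, SORT it, and scan adjacent elements for an equal pair (objective: alternative).

-- ===== PORT A =====
-- the for-loop with its early 'return False' as structural recursion over the index list;
-- arr[i] is in range for every i the loop visits, so pyGetD with default 0 is exact here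
def dif_unique_go (arr : List Int) (is_ : List Int) (seen : PySem.Set Int) : Bool :=
  match is_ with
  | [] => true
  | i :: rest =>
    if i > 0 then
      let diff := |PySem.List.pyGetD arr i 0 - PySem.List.pyGetD arr (i - 1) 0|
      if PySem.Set.contains seen diff then false
      else dif_unique_go arr rest (PySem.Set.add seen diff)
    else dif_unique_go arr rest seen

def dif_unique (arr : List Int) : Bool :=
  dif_unique_go arr (PySem.List.pyRange 0 (arr.length : Int) 1) PySem.Set.empty

-- ===== PORT B =====
-- the zip loop over (diffs, diffs[1:]) with its early 'return False'
def adjDistinct : List Int → Bool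
  | x :: y :: rest => if x == y then false else adjDistinct (y :: rest)
  | _ => true

def dif_unique_alt (arr : List Int) : Bool :=
  let diffs := PySem.List.sorted
    (((PySem.List.slice arr (some 1) none).zip arr).map (fun p => |p.1 - p.2|))
    (fun x => x) false
  adjDistinct diffs

-- ===== PRECONDITION & SPEC =====
def Spec_dif_unique (arr : List Int) (out : Bool) : Prop := out = dif_unique_alt arr
instance (arr : List Int) (out : Bool) : Decidable (Spec_dif_unique arr out) := by unfold Spec_dif_unique; infer_instance

-- ===== CLAIM (what is proved, stated in full; the proofs are below) =====
def Claim_equal_dif_unique : Prop := ∀ (arr : List Int), Dom_dif_unique arr → Spec_dif_unique arr (dif_unique arr)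

-- ===== LEMMAS AND PROOFS =====

-- A's checker characterised: true iff the remaining diffs are distinct and none was seen before
lemma chk_spec (arr : List Int) : ∀ (is_ : List Int) (seen : PySem.Set Int),
    (∀ i ∈ is_, 0 < i) →
    dif_unique_go arr is_ seen =
      decide ((is_.map (fun i => |PySem.List.pyGetD arr i 0 - PySem.List.pyGetD arr (i - 1) 0|)).Nodup ∧
        ∀ d ∈ is_.map (fun i => |PySem.List.pyGetD arr i 0 - PySem.List.pyGetD arr (i - 1) 0|), d ∉ seen) := by
  intro is_
  induction is_ with
  | nil => intro seen _; simp [dif_unique_go]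
  | cons i rest ih =>
    intro seen hpos
    have hi : 0 < i := hpos i (by simp)
    rw [dif_unique_go]
    rw [if_pos (by exact hi)]
    by_cases hc : |PySem.List.pyGetD arr i 0 - PySem.List.pyGetD arr (i - 1) 0| ∈ seen
    · rw [if_pos (by simpa [PySem.Set.contains_iff] using hc)]
      simp only [List.map_cons]
      symm
      simp only [decide_eq_false_iff_not]
      intro h
      exact h.2 _ (by simp) hc
    · rw [if_neg (by simpa [PySem.Set.contains_iff] using hc)]
      rw [ih _ (fun j hj => hpos j (by simp [hj]))]
      simp only [List.map_cons, List.nodup_cons, List.mem_cons, decide_eq_decide,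
        PySem.Set.mem_add, List.mem_map]
      constructor
      · rintro ⟨hnd, h3⟩
        refine ⟨⟨?_, hnd⟩, ?_⟩
        · rintro ⟨a, ha, hae⟩
          exact (h3 _ ⟨a, ha, rfl⟩) (Or.inr hae)
        · rintro d (rfl | hd)
          · exact hc
          · intro hds; exact (h3 d hd) (Or.inl hds)
      · rintro ⟨⟨hni, hnd⟩, h3⟩
        refine ⟨hnd, fun d hd => ?_⟩
        rintro (hds | rfl)
        · exact h3 d (Or.inr hd) hds
        · exact hni hd

-- on a ≤-sorted list, no equal adjacent pair is exactly Nodup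
lemma adjDistinct_of_pairwise (ds : List Int) (h : ds.Pairwise (· ≤ ·)) :
    adjDistinct ds = decide ds.Nodup := by
  induction ds with
  | nil => decide
  | cons x t ih =>
    cases t with
    | nil => simp [adjDistinct]
    | cons y rest =>
      rw [adjDistinct]
      rcases List.pairwise_cons.mp h with ⟨hx, ht⟩
      by_cases hxy : x = y
      · rw [if_pos (by simpa using hxy)]
        symm
        simp only [decide_eq_false_iff_not, List.nodup_cons]
        rintro ⟨hni, _⟩
        exact hni (by simp [hxy])
      · rw [if_neg (by simpa using hxy)]
        rw [ih ht]
        simp only [decide_eq_decide, List.nodup_cons, List.mem_cons]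
        constructor
        · intro hnd
          refine ⟨?_, hnd⟩
          rintro (rfl | hxr)
          · exact hxy rfl
          · have hxy' : x < y := lt_of_le_of_ne (hx y (by simp)) hxy
            have hyx : y ≤ x := le_trans ((List.pairwise_cons.mp ht).1 x hxr) le_rfl
            omega
        · rintro ⟨_, hnd⟩; exact hnd

-- the diffs A's loop visits, in order, are exactly B's comprehension
lemma diffs_eq (arr : List Int) :
    (PySem.List.pyRange 1 (arr.length : Int) 1).map
        (fun i => |PySem.List.pyGetD arr i 0 - PySem.List.pyGetD arr (i - 1) 0|) =
      ((PySem.List.slice arr (some 1) none).zip arr).map (fun p => |p.1 - p.2|) := by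
  rw [PySem.List.slice_from_one]
  apply List.ext_getElem
  · simp [PySem.List.length_pyRange_one, List.length_zip, List.length_tail]
  · intro k h1 h2
    simp only [List.getElem_map, PySem.List.getElem_pyRange_one, List.getElem_zip,
      List.getElem_tail]
    have hlen : (PySem.List.pyRange 1 (arr.length : Int) 1).length = arr.length - 1 := by
      simp [PySem.List.length_pyRange_one]
    simp only [List.length_map] at h1 h2
    rw [hlen] at h1
    have hk1 : k + 1 < arr.length := by omega
    have e2 : (1 : Int) + k - 1 = ((k : Nat) : Int) := by ring
    have e1 : (1 : Int) + k = ((k + 1 : Nat) : Int) := by push_cast; ring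
    rw [e2, e1, PySem.List.pyGetD_natCast, PySem.List.pyGetD_natCast]
    simp [List.getD_eq_getElem?_getD, List.getElem?_eq_getElem hk1,
      List.getElem?_eq_getElem (by omega : k < arr.length)]

-- ===== VERDICT (by name: the statement is the Claim_ definition above) =====
theorem dif_unique_spec : Claim_equal_dif_unique := by
  intro arr _
  unfold Spec_dif_unique
  simp only [dif_unique, dif_unique_alt]
  have hB : adjDistinct (PySem.List.sorted
      (((PySem.List.slice arr (some 1) none).zip arr).map (fun p => |p.1 - p.2|)) (fun x => x) false)
      = decide (((PySem.List.slice arr (some 1) none).zip arr).map (fun p => |p.1 - p.2|)).Nodup := by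
    have hpw := PySem.List.sorted_pairwise
      (((PySem.List.slice arr (some 1) none).zip arr).map (fun p => |p.1 - p.2|)) (fun x : Int => x)
    rw [adjDistinct_of_pairwise _ (by simpa using hpw)]
    simp only [decide_eq_decide]
    exact (PySem.List.sorted_perm _ _ _).nodup_iff
  rcases Nat.eq_zero_or_pos arr.length with hz | hp
  · rw [List.length_eq_zero_iff.mp hz]; decide
  · have h0 : (0 : Int) < (arr.length : Int) := by exact_mod_cast hp
    rw [PySem.List.pyRange_one_cons h0]
    rw [dif_unique_go]
    rw [if_neg (by omega)]
    rw [chk_spec arr _ _ (fun i hi => by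
      have := (PySem.List.mem_pyRange_one).mp hi
      omega)]
    simp only [zero_add]
    rw [hB, ← diffs_eq arr]
    simp [PySem.Set.empty]
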